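-- pv_equiv track=rewrite | github.com/lkyin/ASFI-Project-Explorer-APE- | code/generate_networks.py | dealising
-- ===== SOURCE A (Python) =====
-- def dealising(str1, str2):
--
--     str1, str2 = str1.lower(), str2.lower()
--
--     m = len(str1)
--     n = len(str2)
--     # Create a table to store results of subproblems
--     dp = [[0 for x in range(n + 1)] for x in range(m + 1)]
--
--     '''
--     if m == n:
--         if str1 == str2 or (str1.replace('.', ' ') == str2) or (str2.replace('.', ' ') == str1):
--             return True
--         return False
--     if m > n:
--         if str1[:-1] == str2 or str1[1:] == str2:
--             return True
--     '''
--     #if m < n: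
--     if str2[:-1] == str1 or str2[1:] == str1:
--         return True
--
--     # Fill d[][] in bottom up manner
--     for i in range(m + 1):
--         for j in range(n + 1):
--
--             # If first string is empty, only option is to
--             # insert all characters of second string
--             if i == 0:
--                 dp[i][j] = j    # Min. operations = j
--
--             # If second string is empty, only option is to
--             # remove all characters of second string
--             elif j == 0:
--                 dp[i][j] = i    # Min. operations = i
--
--             # If last characters are same, ignore last char
--             # and recur for remaining string
--             elif str1[i-1] == str2[j-1]:
--                 dp[i][j] = dp[i-1][j-1]
--
--             # If last character are different, consider all
--             # possibilities and find minimum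
--             else:
--                 dp[i][j] = 1 + min(dp[i][j-1],        # Insert
--                                    dp[i-1][j])        # Remove
--     if dp[m][n] == 1:
--         return True
--     else:
--         return False
-- ===== SOURCE B (Python) =====
-- def dealising(str1, str2):
--     a, b = str1.lower(), str2.lower()
--     # ensure a is the shorter string
--     if len(a) > len(b):
--         a, b = b, a
--     if len(b) - len(a) != 1:
--         return False
--     # two pointers: skip the common prefix, then the rest must match after
--     # skipping one character of the longer string
--     i = 0
--     while i < len(a) and a[i] == b[i]:
--         i += 1
--     return a[i:] == b[i + 1:]
-- ===== Notes on version B (the rewrite author's own statement) =====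
-- stated objective: faster
-- what changed: Replaces the O(m*n) insert/delete edit-distance DP table by a two-pointer scan: after a length check (|len difference| must be 1), skip the common prefix and compare the rest of the shorter string with the rest of the longer one shifted by one.
-- intended difference: On the single input where both strings are empty A's early shortcut str2[:-1]==str1 accidentally fires and A returns True although the edit distance is 0, while B returns False, which is the intended answer for a 'differ by exactly one insertion/deletion' test. — e.g. on dealising("", ""): A returns true, B returns false
import Mathlib
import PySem

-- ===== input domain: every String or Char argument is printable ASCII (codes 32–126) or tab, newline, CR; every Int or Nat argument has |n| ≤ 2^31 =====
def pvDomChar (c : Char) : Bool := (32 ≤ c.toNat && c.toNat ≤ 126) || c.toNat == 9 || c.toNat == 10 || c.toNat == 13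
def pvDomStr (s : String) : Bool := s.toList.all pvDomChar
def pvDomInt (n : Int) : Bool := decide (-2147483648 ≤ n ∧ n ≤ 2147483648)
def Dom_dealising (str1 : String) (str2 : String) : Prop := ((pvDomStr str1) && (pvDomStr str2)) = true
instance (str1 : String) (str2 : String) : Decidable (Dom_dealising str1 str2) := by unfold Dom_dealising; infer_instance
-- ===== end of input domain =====

-- B replaces A's O(m*n) insert/delete edit-distance DP by a two-pointer O(m+n) scan;
-- on the single input ("", "") A's early shortcut accidentally returns True while B returns False (see D_).

-- ===== PORT A =====
-- helpers for A's 2-D dp table (a list of rows); every access the port makes is in range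
def tGet (dp : List (List Nat)) (i j : Nat) : Nat := (dp.getD i []).getD j 0
def tSet (dp : List (List Nat)) (i j : Nat) (v : Nat) : List (List Nat) :=
  dp.set i ((dp.getD i []).set j v)

/-- A's body after the two `.lower()` calls; `range(m+1)` with `m ≥ 0` is `List.range (m+1)`;
`str1[i-1]`/`str2[j-1]` are in range in the branches that read them, ported as `getD`;
`str2[:-1]` is `dropLast`, `str2[1:]` is `drop 1`. -/
def dealisingCore (l1 l2 : List Char) : Bool :=
  let m := l1.length
  let n := l2.length
  let dp0 : List (List Nat) := (List.range (m+1)).map (fun _ => (List.range (n+1)).map (fun _ => 0))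
  if l2.dropLast == l1 || l2.drop 1 == l1 then true
  else
    let dp := (List.range (m+1)).foldl (fun dp i =>
      (List.range (n+1)).foldl (fun dp j =>
        if i = 0 then tSet dp i j j
        else if j = 0 then tSet dp i j i
        else if l1.getD (i-1) ' ' = l2.getD (j-1) ' ' then tSet dp i j (tGet dp (i-1) (j-1))
        else tSet dp i j (1 + min (tGet dp i (j-1)) (tGet dp (i-1) j))) dp) dp0
    tGet dp m n == 1

def dealising (str1 : String) (str2 : String) : Bool :=
  dealisingCore (PySem.Str.lower str1).toList (PySem.Str.lower str2).toList

-- ===== PORT B =====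
/-- B's while loop: skip the common prefix, then compare `a[i:]` with `b[i+1:]`.
(The fallback case with `a` longer than `b` is unreachable under B's length guard.) -/
def twoPtr : List Char → List Char → Bool
  | x :: xs, y :: ys => if x = y then twoPtr xs ys else (x :: xs) == ys
  | xs, ys => xs == ys.drop 1

/-- B's body after the two `.lower()` calls: swap so `p.1` is the shorter string,
require the length difference to be exactly 1, then run the two-pointer scan. -/
def dealisingAltCore (a0 b0 : List Char) : Bool :=
  let p := if a0.length > b0.length then (b0, a0) else (a0, b0)
  if (p.2.length : Int) - (p.1.length : Int) ≠ 1 then false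
  else twoPtr p.1 p.2

def dealising_alt (str1 : String) (str2 : String) : Bool :=
  dealisingAltCore (PySem.Str.lower str1).toList (PySem.Str.lower str2).toList

-- ===== PRECONDITION & SPEC =====
-- When both strings are empty, A's early shortcut str2[:-1]==str1 accidentally fires and A
-- returns true although the edit distance is 0; B returns false, the intended answer for a
-- "differ by exactly one insertion/deletion" test.
def D_dealising (str1 : String) (str2 : String) : Prop := str1 = "" ∧ str2 = ""
instance (str1 : String) (str2 : String) : Decidable (D_dealising str1 str2) := by unfold D_dealising; infer_instance

def Spec_dealising (str1 : String) (str2 : String) (out : Bool) : Prop :=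
  ¬ D_dealising str1 str2 → out = dealising_alt str1 str2
instance (str1 : String) (str2 : String) (out : Bool) : Decidable (Spec_dealising str1 str2 out) := by unfold Spec_dealising; infer_instance

def pvDiffWitness_dealising : String × String := ("", "")
def pvDiffWitnessOut_dealising : Bool × Bool := (true, false)

-- ===== CLAIM (what is proved, stated in full; the proofs are below) =====
def Claim_unchanged_dealising : Prop := ∀ (str1 : String) (str2 : String), Dom_dealising str1 str2 → Spec_dealising str1 str2 (dealising str1 str2)
def Claim_changed_dealising : Prop := Dom_dealising (pvDiffWitness_dealising.1) (pvDiffWitness_dealising.2) ∧ D_dealising (pvDiffWitness_dealising.1) (pvDiffWitness_dealising.2) ∧ dealising (pvDiffWitness_dealising.1) (pvDiffWitness_dealising.2) = pvDiffWitnessOut_dealising.1 ∧ dealising_alt (pvDiffWitness_dealising.1) (pvDiffWitness_dealising.2) = pvDiffWitnessOut_dealising.2 ∧ pvDiffWitnessOut_dealising.1 ≠ pvDiffWitnessOut_dealising.2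
def Claim_exact_dealising : Prop := ∀ (str1 : String) (str2 : String), Dom_dealising str1 str2 → D_dealising str1 str2 → dealising str1 str2 ≠ dealising_alt str1 str2

-- ===== LEMMAS AND PROOFS =====

/-- `a` is obtained from `b` by deleting exactly one character. -/
def OD (a b : List Char) : Prop := ∃ p c q, a = p ++ q ∧ b = p ++ c :: q

/-- insert/delete edit distance, recursing on the fronts. -/
def E : List Char → List Char → Nat
  | [], ys => ys.length
  | x :: xs, [] => (x :: xs).length
  | x :: xs, y :: ys => if x = y then E xs ys else 1 + min (E (x :: xs) ys) (E xs (y :: ys))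
termination_by xs ys => xs.length + ys.length
decreasing_by all_goals (simp only [List.length_cons]; omega)

/-- the recurrence A's table satisfies, on prefix lengths. -/
def F (l1 l2 : List Char) (i j : Nat) : Nat :=
  if i = 0 then j
  else if j = 0 then i
  else if l1.getD (i-1) ' ' = l2.getD (j-1) ' ' then F l1 l2 (i-1) (j-1)
  else 1 + min (F l1 l2 i (j-1)) (F l1 l2 (i-1) j)
termination_by i + j
decreasing_by all_goals omega

/-- names for the two fold bodies of A's dp loop (definitionally the lambdas of the port). -/
def innerStep (l1 l2 : List Char) (i : Nat) (dp : List (List Nat)) (j : Nat) : List (List Nat) :=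
  if i = 0 then tSet dp i j j
  else if j = 0 then tSet dp i j i
  else if l1.getD (i-1) ' ' = l2.getD (j-1) ' ' then tSet dp i j (tGet dp (i-1) (j-1))
  else tSet dp i j (1 + min (tGet dp i (j-1)) (tGet dp (i-1) j))

def outerStep (l1 l2 : List Char) (dp : List (List Nat)) (i : Nat) : List (List Nat) :=
  (List.range (l2.length + 1)).foldl (innerStep l1 l2 i) dp

def dpInit (l1 l2 : List Char) : List (List Nat) :=
  (List.range (l1.length + 1)).map (fun _ => (List.range (l2.length + 1)).map (fun _ => 0))

theorem core_unfold (l1 l2 : List Char) :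
    dealisingCore l1 l2 =
      if l2.dropLast == l1 || l2.drop 1 == l1 then true
      else tGet ((List.range (l1.length + 1)).foldl (outerStep l1 l2) (dpInit l1 l2))
        l1.length l2.length == 1 := rfl

theorem OD_length {a b : List Char} (h : OD a b) : b.length = a.length + 1 := by
  obtain ⟨p, c, q, rfl, rfl⟩ := h
  simp [List.length_append]
  omega

theorem OD_reverse {a b : List Char} (h : OD a b) : OD a.reverse b.reverse := by
  obtain ⟨p, c, q, rfl, rfl⟩ := h
  exact ⟨q.reverse, c, p.reverse, by simp, by simp⟩

theorem OD_rev_iff (a b : List Char) : OD a.reverse b.reverse ↔ OD a b := by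
  constructor
  · intro h
    have h2 := OD_reverse h
    simpa using h2
  · exact OD_reverse

theorem OD_nil_left (b : List Char) : OD [] b ↔ ∃ c, b = [c] := by
  constructor
  · rintro ⟨p, c, q, hp, rfl⟩
    obtain ⟨rfl, rfl⟩ := List.append_eq_nil_iff.mp hp.symm
    exact ⟨c, rfl⟩
  · rintro ⟨c, rfl⟩
    exact ⟨[], c, [], rfl, rfl⟩

theorem OD_drop_head (x : Char) (xs : List Char) : OD xs (x :: xs) :=
  ⟨[], x, xs, rfl, rfl⟩

theorem OD_cons (x y : Char) (xs ys : List Char) :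
    OD (x :: xs) (y :: ys) ↔ x :: xs = ys ∨ (x = y ∧ OD xs ys) := by
  constructor
  · rintro ⟨p, c, q, h1, h2⟩
    cases p with
    | nil =>
      simp only [List.nil_append] at h1 h2
      injection h2 with h2a h2b
      left; rw [h1, h2b]
    | cons z p' =>
      simp only [List.cons_append] at h1 h2
      injection h1 with h1a h1b
      injection h2 with h2a h2b
      right
      exact ⟨h1a.trans h2a.symm, p', c, q, h1b, h2b⟩
  · rintro (h | ⟨rfl, p, c, q, rfl, rfl⟩)
    · exact ⟨[], y, x :: xs, rfl, by simp [h]⟩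
    · exact ⟨x :: p, c, q, rfl, rfl⟩

theorem OD_cons_same (x : Char) (xs ys : List Char) : OD (x :: xs) (x :: ys) ↔ OD xs ys := by
  rw [OD_cons]
  constructor
  · rintro (h | ⟨-, h⟩)
    · rw [← h]; exact OD_drop_head x xs
    · exact h
  · intro h; exact Or.inr ⟨rfl, h⟩

theorem E_eq_zero (a b : List Char) : E a b = 0 ↔ a = b := by
  fun_induction E a b with
  | case1 ys => simp [eq_comm, List.length_eq_zero_iff]
  | case2 x xs => simp
  | case3 xs y ys ih => simpa using ih
  | case4 x xs y ys hxy ih1 ih2 => simp [hxy]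

theorem E_one (a b : List Char) : E a b = 1 ↔ OD a b ∨ OD b a := by
  fun_induction E a b with
  | case1 ys =>
    have h2 : ¬ OD ys [] := fun h => by have := OD_length h; simp at this
    simp only [h2, or_false, OD_nil_left, List.length_eq_one_iff]
  | case2 x xs =>
    have h2 : ¬ OD (x :: xs) [] := fun h => by have := OD_length h; simp at this
    simp only [h2, false_or, OD_nil_left, List.length_cons]
    constructor
    · intro h
      have hx : xs = [] := List.length_eq_zero_iff.mp (by omega)
      exact ⟨x, by rw [hx]⟩
    · rintro ⟨c, hc⟩
      injection hc with hc1 hc2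
      simp [hc2]
  | case3 xs y ys ih =>
    rw [ih, OD_cons_same, OD_cons_same]
  | case4 x xs y ys hxy ih1 ih2 =>
    have hyx : ¬ y = x := fun h => hxy h.symm
    rw [OD_cons, OD_cons]
    constructor
    · intro h
      have hmin : min (E (x :: xs) ys) (E xs (y :: ys)) = 0 := by omega
      rcases Nat.min_eq_zero_iff.mp hmin with h0 | h0
      · exact Or.inl (Or.inl ((E_eq_zero _ _).mp h0))
      · exact Or.inr (Or.inl (((E_eq_zero _ _).mp h0).symm))
    · rintro ((h | ⟨h, -⟩) | (h | ⟨h, -⟩))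
      · have h0 : E (x :: xs) ys = 0 := (E_eq_zero _ _).mpr h
        omega
      · exact absurd h hxy
      · have h0 : E xs (y :: ys) = 0 := (E_eq_zero _ _).mpr h.symm
        omega
      · exact absurd h hyx

theorem E_nil_right (a : List Char) : E a [] = a.length := by
  cases a <;> simp [E]

theorem take_rev_cons (l : List Char) (i : Nat) (h0 : 0 < i) (h1 : i ≤ l.length) :
    (l.take i).reverse = l.getD (i-1) ' ' :: (l.take (i-1)).reverse := by
  obtain ⟨k, rfl⟩ : ∃ k, i = k + 1 := ⟨i - 1, by omega⟩
  have hk : k < l.length := by omega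
  rw [List.take_add_one, List.getElem?_eq_getElem hk]
  simp [List.getD_eq_getElem?_getD, List.getElem?_eq_getElem hk]

theorem F_eq (l1 l2 : List Char) : ∀ N i j, i + j ≤ N → i ≤ l1.length → j ≤ l2.length →
    F l1 l2 i j = E (l1.take i).reverse (l2.take j).reverse := by
  intro N
  induction N with
  | zero =>
    intro i j h hi hj
    have hiz : i = 0 := by omega
    have hjz : j = 0 := by omega
    subst hiz; subst hjz
    rw [F]
    simp [E]
  | succ N ih =>
    intro i j h hi hj
    by_cases hiz : i = 0
    · subst hiz
      rw [F]
      simp [E, Nat.min_eq_left hj]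
    · by_cases hjz : j = 0
      · subst hjz
        rw [F]
        rw [if_neg hiz, if_pos rfl]
        simp [E_nil_right, Nat.min_eq_left hi]
      · rw [F]
        rw [if_neg hiz, if_neg hjz]
        rw [take_rev_cons l1 i (by omega) hi, take_rev_cons l2 j (by omega) hj]
        by_cases hch : l1.getD (i-1) ' ' = l2.getD (j-1) ' '
        · rw [if_pos hch, E, if_pos hch]
          exact ih (i-1) (j-1) (by omega) (by omega) (by omega)
        · rw [if_neg hch, E, if_neg hch]
          rw [← take_rev_cons l1 i (by omega) hi, ← take_rev_cons l2 j (by omega) hj]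
          rw [ih i (j-1) (by omega) hi (by omega)]
          rw [ih (i-1) j (by omega) (by omega) hj]

-- table bookkeeping
theorem getD_set_row (dp : List (List Nat)) (i : Nat) (r : List Nat) (hi : i < dp.length) (i' : Nat) :
    (dp.set i r).getD i' [] = if i' = i then r else dp.getD i' [] := by
  by_cases hii : i' = i
  · subst hii; simp [List.getD_eq_getElem?_getD, hi]
  · rw [if_neg hii, List.getD_eq_getElem?_getD, List.getElem?_set,
      if_neg (fun h : i = i' => hii h.symm), ← List.getD_eq_getElem?_getD]

theorem getD_set_nat (l : List Nat) (j v : Nat) (hj : j < l.length) (j' : Nat) :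
    (l.set j v).getD j' 0 = if j' = j then v else l.getD j' 0 := by
  by_cases hjj : j' = j
  · subst hjj; simp [List.getD_eq_getElem?_getD, hj]
  · rw [if_neg hjj, List.getD_eq_getElem?_getD, List.getElem?_set,
      if_neg (fun h : j = j' => hjj h.symm), ← List.getD_eq_getElem?_getD]

theorem tGet_tSet (dp : List (List Nat)) (i j v : Nat)
    (hi : i < dp.length) (hj : j < (dp.getD i []).length) (i' j' : Nat) :
    tGet (tSet dp i j v) i' j' = if i' = i ∧ j' = j then v else tGet dp i' j' := by
  unfold tGet tSet
  rw [getD_set_row dp i _ hi]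
  by_cases hii : i' = i
  · subst hii
    rw [if_pos rfl, getD_set_nat _ j v hj]
    by_cases hjj : j' = j
    · simp [hjj]
    · simp [hjj]
  · simp [hii]

theorem tSet_length (dp : List (List Nat)) (i j v : Nat) :
    (tSet dp i j v).length = dp.length := by simp [tSet]

theorem tSet_row_length (dp : List (List Nat)) (i j v r : Nat) :
    ((tSet dp i j v).getD r []).length = (dp.getD r []).length := by
  by_cases hi : i < dp.length
  · unfold tSet
    rw [getD_set_row dp i _ hi]
    by_cases hii : r = i
    · subst hii; simp
    · simp [hii]
  · unfold tSet
    rw [List.set_eq_of_length_le (by omega)]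

theorem dpInit_length (l1 l2 : List Char) : (dpInit l1 l2).length = l1.length + 1 := by
  simp [dpInit]

theorem dpInit_row (l1 l2 : List Char) (r : Nat) (hr : r < l1.length + 1) :
    ((dpInit l1 l2).getD r []).length = l2.length + 1 := by
  unfold dpInit
  rw [List.getD_eq_getElem?_getD, List.getElem?_map, List.getElem?_range hr]
  simp

-- the inner dp loop fills row i with F, keeping shape and earlier rows
theorem inner_loop (l1 l2 : List Char) (i : Nat) (hi : i ≤ l1.length)
    (dp : List (List Nat))
    (hlen : dp.length = l1.length + 1)
    (hrow : ∀ r, r < l1.length + 1 → (dp.getD r []).length = l2.length + 1)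
    (hprev : ∀ i' j', i' < i → j' ≤ l2.length → tGet dp i' j' = F l1 l2 i' j') :
    ∀ k, k ≤ l2.length + 1 →
      ((List.range k).foldl (innerStep l1 l2 i) dp).length = l1.length + 1
      ∧ (∀ r, r < l1.length + 1 →
          (((List.range k).foldl (innerStep l1 l2 i) dp).getD r []).length = l2.length + 1)
      ∧ (∀ i' j', i' < i → j' ≤ l2.length →
          tGet ((List.range k).foldl (innerStep l1 l2 i) dp) i' j' = F l1 l2 i' j')
      ∧ (∀ j', j' < k → tGet ((List.range k).foldl (innerStep l1 l2 i) dp) i j' = F l1 l2 i j') := by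
  intro k
  induction k with
  | zero =>
    intro _
    simp only [List.range_zero, List.foldl_nil]
    exact ⟨hlen, hrow, hprev, fun j' hj' => absurd hj' (by omega)⟩
  | succ k ihk =>
    intro hk
    obtain ⟨glen, grow, gprev, gcur⟩ := ihk (by omega)
    rw [List.range_succ, List.foldl_append, List.foldl_cons, List.foldl_nil]
    set dpk := (List.range k).foldl (innerStep l1 l2 i) dp with hdpk
    have hkn : k ≤ l2.length := by omega
    have hilt : i < dpk.length := by omega
    have hjlt : k < (dpk.getD i []).length := by rw [grow i (by omega)]; omega
    have hcell : innerStep l1 l2 i dpk k = tSet dpk i k (F l1 l2 i k) := by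
      unfold innerStep
      by_cases hiz : i = 0
      · rw [if_pos hiz, F, if_pos hiz]
      · by_cases hkz : k = 0
        · rw [if_neg hiz, if_pos hkz, F, if_neg hiz, if_pos hkz]
        · by_cases hch : l1.getD (i-1) ' ' = l2.getD (k-1) ' '
          · rw [if_neg hiz, if_neg hkz, if_pos hch, F, if_neg hiz, if_neg hkz, if_pos hch]
            rw [gprev (i-1) (k-1) (by omega) (by omega)]
          · rw [if_neg hiz, if_neg hkz, if_neg hch, F, if_neg hiz, if_neg hkz, if_neg hch]
            rw [gcur (k-1) (by omega), gprev (i-1) k (by omega) hkn]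
    rw [hcell]
    refine ⟨by rw [tSet_length]; exact glen,
      fun r hr => by rw [tSet_row_length]; exact grow r hr, ?_, ?_⟩
    · intro i' j' hi' hj'
      rw [tGet_tSet dpk i k _ hilt hjlt]
      rw [if_neg (by rintro ⟨rfl, -⟩; omega)]
      exact gprev i' j' hi' hj'
    · intro j' hj'
      rw [tGet_tSet dpk i k _ hilt hjlt]
      by_cases hjk : j' = k
      · subst hjk; rw [if_pos ⟨rfl, rfl⟩]
      · rw [if_neg (by rintro ⟨-, h⟩; exact hjk h)]
        exact gcur j' (by omega)

theorem outer_loop (l1 l2 : List Char) :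
    ∀ r, r ≤ l1.length + 1 →
      ((List.range r).foldl (outerStep l1 l2) (dpInit l1 l2)).length = l1.length + 1
      ∧ (∀ r', r' < l1.length + 1 →
          (((List.range r).foldl (outerStep l1 l2) (dpInit l1 l2)).getD r' []).length = l2.length + 1)
      ∧ (∀ i' j', i' < r → j' ≤ l2.length →
          tGet ((List.range r).foldl (outerStep l1 l2) (dpInit l1 l2)) i' j' = F l1 l2 i' j') := by
  intro r
  induction r with
  | zero =>
    intro _
    simp only [List.range_zero, List.foldl_nil]
    exact ⟨dpInit_length l1 l2, fun r' hr' => dpInit_row l1 l2 r' hr',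
      fun i' j' hi' _ => absurd hi' (by omega)⟩
  | succ r ihr =>
    intro hr
    obtain ⟨glen, grow, gprev⟩ := ihr (by omega)
    rw [List.range_succ, List.foldl_append, List.foldl_cons, List.foldl_nil]
    obtain ⟨hlen', hrow', hprev', hcur'⟩ :=
      inner_loop l1 l2 r (by omega) _ glen grow gprev (l2.length + 1) (by omega)
    refine ⟨hlen', hrow', ?_⟩
    intro i' j' hi' hj'
    by_cases hir : i' = r
    · subst hir; exact hcur' j' (by omega)
    · exact hprev' i' j' (by omega) hj'

-- characterizations of the two cores
theorem twoPtr_iff (a : List Char) : ∀ b : List Char, b.length = a.length + 1 →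
    (twoPtr a b = true ↔ OD a b) := by
  induction a with
  | nil =>
    intro b hb
    obtain ⟨c, rfl⟩ := List.length_eq_one_iff.mp hb
    constructor
    · intro _; exact ⟨[], c, [], rfl, rfl⟩
    · intro _; rfl
  | cons x xs ih =>
    intro b hb
    cases b with
    | nil => simp at hb
    | cons y ys =>
      simp only [List.length_cons] at hb
      by_cases hxy : x = y
      · subst hxy
        rw [show twoPtr (x :: xs) (x :: ys) = twoPtr xs ys by simp [twoPtr]]
        rw [OD_cons_same]
        exact ih ys (by omega)
      · rw [show twoPtr (x :: xs) (y :: ys) = ((x :: xs) == ys) by simp [twoPtr, hxy]]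
        rw [OD_cons]
        simp [hxy, beq_iff_eq]

theorem altCore_char (a b : List Char) :
    dealisingAltCore a b = true ↔ OD a b ∨ OD b a := by
  unfold dealisingAltCore
  by_cases hab : a.length > b.length
  · rw [if_pos hab]
    simp only
    by_cases hd : (a.length : Int) - (b.length : Int) ≠ 1
    · rw [if_pos hd]
      have h1 : ¬ OD a b := fun h => by have := OD_length h; omega
      have h2 : ¬ OD b a := fun h => by have := OD_length h; omega
      simp [h1, h2]
    · rw [if_neg hd]
      rw [not_not] at hd
      have hlen : a.length = b.length + 1 := by omega
      rw [twoPtr_iff b a hlen]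
      have h1 : ¬ OD a b := fun h => by have := OD_length h; omega
      simp [h1]
  · rw [if_neg hab]
    simp only
    by_cases hd : (b.length : Int) - (a.length : Int) ≠ 1
    · rw [if_pos hd]
      have h1 : ¬ OD a b := fun h => by have := OD_length h; omega
      have h2 : ¬ OD b a := fun h => by have := OD_length h; omega
      simp [h1, h2]
    · rw [if_neg hd]
      rw [not_not] at hd
      have hlen : b.length = a.length + 1 := by omega
      rw [twoPtr_iff a b hlen]
      have h2 : ¬ OD b a := fun h => by have := OD_length h; omega
      simp [h2]

theorem core_char (l1 l2 : List Char) (h : ¬ (l1 = [] ∧ l2 = [])) :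
    dealisingCore l1 l2 = true ↔ OD l1 l2 ∨ OD l2 l1 := by
  rw [core_unfold]
  by_cases hearly : (l2.dropLast == l1 || l2.drop 1 == l1) = true
  · rw [if_pos hearly]
    have hne : l2 ≠ [] := by
      rintro rfl
      rcases Bool.or_eq_true_iff.mp hearly with he | he
      · exact h ⟨(beq_iff_eq.mp he).symm, rfl⟩
      · exact h ⟨(beq_iff_eq.mp he).symm, rfl⟩
    have hod : OD l1 l2 := by
      rcases Bool.or_eq_true_iff.mp hearly with he | he
      · have he' : l2.dropLast = l1 := beq_iff_eq.mp he
        have hcat : l2.dropLast ++ [l2.getLast hne] = l2 := List.dropLast_concat_getLast hne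
        rw [he'] at hcat
        exact ⟨l1, l2.getLast hne, [], by simp, hcat.symm⟩
      · have he' : l2.drop 1 = l1 := beq_iff_eq.mp he
        have hcons : l2 = l2.head hne :: l1 := by
          rw [← he', List.drop_one]
          exact (List.cons_head_tail hne).symm
        rw [hcons]
        exact OD_drop_head _ l1
    simp [hod]
  · rw [if_neg hearly]
    have hget := (outer_loop l1 l2 (l1.length + 1) (le_refl _)).2.2
      l1.length l2.length (by omega) (le_refl _)
    rw [hget]
    rw [F_eq l1 l2 (l1.length + l2.length) l1.length l2.length (le_refl _) (le_refl _) (le_refl _)]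
    rw [List.take_length, List.take_length, beq_iff_eq]
    have hE := E_one l1.reverse l2.reverse
    rw [OD_rev_iff, OD_rev_iff] at hE
    exact hE

theorem toList_lower_empty (s : String) :
    (PySem.Str.lower s).toList = [] ↔ s = "" := by
  rw [PySem.Str.toList_lower]
  constructor
  · intro h
    exact String.toList_eq_nil_iff.mp (List.map_eq_nil_iff.mp h)
  · rintro rfl
    rfl

-- ===== VERDICT (by name: the statement is the Claim_ definition above) =====
theorem dealising_spec : Claim_unchanged_dealising := by
  intro s1 s2 _
  unfold Spec_dealising
  intro hnd
  unfold dealising dealising_alt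
  apply Bool.coe_iff_coe.mp
  rw [core_char _ _ (fun hc => hnd ⟨(toList_lower_empty s1).mp hc.1, (toList_lower_empty s2).mp hc.2⟩)]
  rw [altCore_char]

theorem dealising_changed : Claim_changed_dealising := by
  unfold Claim_changed_dealising; decide

theorem dealising_tight : Claim_exact_dealising := by
  intro s1 s2 _ hD
  obtain ⟨rfl, rfl⟩ := hD
  decide
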